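-- pv_equiv track=rewrite | github.com/JasmineZhangxyz/data-structs-and-algos | median-maintenance/medianMaintenance.py | brute_force_median
-- ===== SOURCE A (Python) =====
-- def brute_force_median(array1):
--     med_sum = 0
--     for i in range(len(array1)):
--         partial_array = array1[0: i + 1]
--         partial_array.sort()
--         length = len(partial_array)
--         if length % 2 == 0:
--             median = partial_array[int(length / 2) - 1]
--         else:
--             median = partial_array[int((length + 1) / 2) - 1]
--         med_sum += median
--     answer = med_sum % len(array1)
--     return answer
-- ===== SOURCE B (Python) =====
-- def brute_force_median(array1):
--     # One pass: maintain a single sorted list instead of re-sorting every prefix.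
--     s = []
--     total = 0
--     for x in array1:
--         i = 0
--         while i < len(s) and s[i] <= x:
--             i += 1
--         s.insert(i, x)
--         total += s[(len(s) - 1) // 2]
--     return total % len(array1)
-- ===== Notes on version B (the rewrite author's own statement) =====
-- stated objective: faster
-- what changed: Instead of copying and re-sorting every prefix and branching on parity for the median index, B makes one pass that keeps a single incrementally-sorted list, inserting each element at its position and reading the lower median at index (len-1)//2.
import Mathlib
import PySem

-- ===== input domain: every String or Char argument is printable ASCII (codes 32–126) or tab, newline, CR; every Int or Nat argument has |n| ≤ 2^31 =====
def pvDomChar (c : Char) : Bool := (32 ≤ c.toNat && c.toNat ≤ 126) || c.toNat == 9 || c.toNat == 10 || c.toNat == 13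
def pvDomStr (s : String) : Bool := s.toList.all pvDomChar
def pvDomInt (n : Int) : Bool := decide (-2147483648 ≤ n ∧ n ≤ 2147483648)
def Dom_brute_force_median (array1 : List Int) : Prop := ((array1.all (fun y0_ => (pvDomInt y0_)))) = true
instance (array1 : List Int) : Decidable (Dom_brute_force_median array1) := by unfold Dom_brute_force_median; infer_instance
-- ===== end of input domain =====

-- B replaces A's "re-sort every prefix" by one pass maintaining a single sorted list (faster; A's value is reproduced exactly on nonempty input).

-- ===== PORT A =====
-- Literal port of A. Notes: int(length/2) and int((length+1)/2) are exact floor divisions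
-- here (the dividend is the even one of the pair), ported as PySem.Int.floordiv; the median
-- index is always in range (the prefix is nonempty), so the indexing is ported with pyGetD.
def brute_force_median (array1 : List Int) : Int :=
  let med_sum :=
    (PySem.List.pyRange 0 (array1.length : Int) 1).foldl (fun med_sum i =>
      let partial_array :=
        PySem.List.sorted (PySem.List.slice array1 (some 0) (some (i + 1))) (fun v => v) false
      let length : Int := (partial_array.length : Int)
      let median :=
        if PySem.Int.mod length 2 = 0 then
          PySem.List.pyGetD partial_array (PySem.Int.floordiv length 2 - 1) 0
        else
          PySem.List.pyGetD partial_array (PySem.Int.floordiv (length + 1) 2 - 1) 0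
      med_sum + median) 0
  PySem.Int.mod med_sum (array1.length : Int)

-- ===== PORT B =====
-- pvScanPos is B's while loop finding the insertion index; list.insert is PySem.List.insert.
def pvScanPos (x : Int) : List Int → Nat
  | [] => 0
  | y :: ys => if y ≤ x then pvScanPos x ys + 1 else 0

def pvStep (st : List Int × Int) (x : Int) : List Int × Int :=
  let s := PySem.List.insert st.1 ((pvScanPos x st.1 : Nat) : Int) x
  (s, st.2 + PySem.List.pyGetD s (PySem.Int.floordiv ((s.length : Int) - 1) 2) 0)

def brute_force_median_alt (array1 : List Int) : Int :=
  PySem.Int.mod (array1.foldl pvStep ([], 0)).2 (array1.length : Int)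

-- ===== PRECONDITION & SPEC =====
-- Pre_ excludes only the empty list, on which A (and B) raise ZeroDivisionError at `% len(array1)`.
def Pre_brute_force_median (array1 : List Int) : Prop := array1 ≠ []
instance (array1 : List Int) : Decidable (Pre_brute_force_median array1) := by
  unfold Pre_brute_force_median; infer_instance
def pvWitness_brute_force_median : List Int := ([3, 1, 2])

def Spec_brute_force_median (array1 : List Int) (out : Int) : Prop := out = brute_force_median_alt array1
instance (array1 : List Int) (out : Int) : Decidable (Spec_brute_force_median array1 out) := by unfold Spec_brute_force_median; infer_instance

-- ===== CLAIM (what is proved, stated in full; the proofs are below) =====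
def Claim_equal_brute_force_median : Prop := ∀ (array1 : List Int), Dom_brute_force_median array1 → Pre_brute_force_median array1 → Spec_brute_force_median array1 (brute_force_median array1)

-- ===== LEMMAS AND PROOFS =====

-- the loop body of A, named for reasoning (definitionally the lambda in the port)
def pvBodyA (a : List Int) (med_sum i : Int) : Int :=
  let partial_array :=
    PySem.List.sorted (PySem.List.slice a (some 0) (some (i + 1))) (fun v => v) false
  let length : Int := (partial_array.length : Int)
  let median :=
    if PySem.Int.mod length 2 = 0 then
      PySem.List.pyGetD partial_array (PySem.Int.floordiv length 2 - 1) 0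
    else
      PySem.List.pyGetD partial_array (PySem.Int.floordiv (length + 1) 2 - 1) 0
  med_sum + median

-- A's inner fold (the value of med_sum), for reasoning about A by snoc induction.
def pvAsum (array1 : List Int) : Int :=
  (PySem.List.pyRange 0 (array1.length : Int) 1).foldl (pvBodyA array1) 0

lemma brute_force_median_eq_asum (array1 : List Int) :
    brute_force_median array1 = PySem.Int.mod (pvAsum array1) (array1.length : Int) := rfl

-- Functional form of B's insertion (scan position + insert).
def pvInsAux (x : Int) : List Int → List Int
  | [] => [x]
  | y :: ys => if y ≤ x then y :: pvInsAux x ys else x :: y :: ys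

lemma pvScanPos_le (x : Int) (s : List Int) : pvScanPos x s ≤ s.length := by
  induction s with
  | nil => simp [pvScanPos]
  | cons y ys ih => by_cases h : y ≤ x <;> simp [pvScanPos, h] <;> omega

lemma insert_eq_insAux (x : Int) (s : List Int) :
    PySem.List.insert s ((pvScanPos x s : Nat) : Int) x = pvInsAux x s := by
  rw [PySem.List.insert_natCast s _ x (pvScanPos_le x s)]
  induction s with
  | nil => simp [pvScanPos, pvInsAux]
  | cons y ys ih =>
    by_cases h : y ≤ x
    · simp [pvScanPos, pvInsAux, h, ih]
    · simp [pvScanPos, pvInsAux, h]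

lemma insAux_perm (x : Int) (s : List Int) : (pvInsAux x s).Perm (x :: s) := by
  induction s with
  | nil => simp [pvInsAux]
  | cons y ys ih =>
    by_cases h : y ≤ x
    · simpa [pvInsAux, h] using (ih.cons y).trans (List.Perm.swap x y ys)
    · simp [pvInsAux, h]

lemma insAux_pairwise (x : Int) (s : List Int) (h : s.Pairwise (· ≤ ·)) :
    (pvInsAux x s).Pairwise (· ≤ ·) := by
  induction s with
  | nil => simp [pvInsAux]
  | cons y ys ih =>
    rcases List.pairwise_cons.1 h with ⟨hy, hys⟩
    by_cases hle : y ≤ x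
    · rw [pvInsAux, if_pos hle]
      refine List.Pairwise.cons (fun z hz => ?_) (ih hys)
      rcases List.mem_cons.1 ((insAux_perm x ys).mem_iff.1 hz) with hzx | hzys
      · omega
      · exact hy z hzys
    · rw [pvInsAux, if_neg hle]
      refine List.Pairwise.cons (fun z hz => ?_) h
      rcases List.mem_cons.1 hz with hzy | hzys
      · omega
      · exact le_trans (by omega) (hy z hzys)

lemma insAux_sorted_snoc (l : List Int) (x : Int) :
    pvInsAux x (PySem.List.sorted l (fun v => v) false) =
      PySem.List.sorted (l ++ [x]) (fun v => v) false := by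
  symm
  apply PySem.List.sorted_id_eq_of_perm_of_pairwise
  · exact (insAux_perm x _).trans
      (((PySem.List.sorted_perm l (fun v => v) false).cons x).trans (List.perm_append_singleton x l).symm)
  · exact insAux_pairwise x _ (PySem.List.sorted_pairwise l (fun v => v))

-- the median index A computes equals B's (len-1)//2, for a nonempty prefix
lemma idx_eq (L : Int) (hL : 1 ≤ L) :
    (if PySem.Int.mod L 2 = 0 then PySem.Int.floordiv L 2 - 1
     else PySem.Int.floordiv (L + 1) 2 - 1) = PySem.Int.floordiv (L - 1) 2 := by
  rw [PySem.Int.mod_eq_emod_of_pos (show (0:Int) < 2 by omega)]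
  rw [PySem.Int.floordiv_eq_ediv_of_pos (show (0:Int) < 2 by omega)]
  rw [PySem.Int.floordiv_eq_ediv_of_pos (show (0:Int) < 2 by omega)]
  rw [PySem.Int.floordiv_eq_ediv_of_pos (show (0:Int) < 2 by omega)]
  split_ifs with h <;> omega

lemma median_if (p : List Int) (hp : p ≠ []) :
    (if PySem.Int.mod ((p.length : Nat) : Int) 2 = 0 then
       PySem.List.pyGetD p (PySem.Int.floordiv ((p.length : Nat) : Int) 2 - 1) 0
     else
       PySem.List.pyGetD p (PySem.Int.floordiv (((p.length : Nat) : Int) + 1) 2 - 1) 0) =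
      PySem.List.pyGetD p (PySem.Int.floordiv (((p.length : Nat) : Int) - 1) 2) 0 := by
  have h1 : 1 ≤ ((p.length : Nat) : Int) := by
    cases p with
    | nil => exact absurd rfl hp
    | cons a as => simp
  rw [← idx_eq _ h1]
  split_ifs with h <;> rfl

lemma bodyA_agree (l : List Int) (x acc i : Int) (h0 : 0 ≤ i) (hn : i < (l.length : Int)) :
    pvBodyA (l ++ [x]) acc i = pvBodyA l acc i := by
  have hslice : PySem.List.slice (l ++ [x]) (some 0) (some (i + 1)) =
      PySem.List.slice l (some 0) (some (i + 1)) := by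
    simp only [PySem.List.slice_zero_start]
    rw [PySem.List.slice_to _ (by omega), PySem.List.slice_to _ (by omega)]
    rw [List.take_append_of_le_length (by omega)]
  simp only [pvBodyA, hslice]

lemma bodyA_last (l : List Int) (x acc : Int) :
    pvBodyA (l ++ [x]) acc ((l.length : Nat) : Int) =
      acc + PySem.List.pyGetD (PySem.List.sorted (l ++ [x]) (fun v => v) false)
        (PySem.Int.floordiv ((l.length : Nat) : Int) 2) 0 := by
  have hslice : PySem.List.slice (l ++ [x]) (some 0) (some (((l.length : Nat) : Int) + 1)) =
      l ++ [x] := by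
    simp only [PySem.List.slice_zero_start]
    rw [PySem.List.slice_to _ (by omega)]
    apply List.take_of_length_le
    simp
  simp only [pvBodyA, hslice]
  rw [median_if _ (by rw [Ne, PySem.List.sorted_eq_nil_iff]; simp)]
  have hL : (((PySem.List.sorted (l ++ [x]) (fun v => v) false).length : Nat) : Int) =
      ((l.length : Nat) : Int) + 1 := by
    rw [PySem.List.length_sorted]
    simp
  rw [hL]
  norm_num

lemma pvAsum_snoc (l : List Int) (x : Int) :
    pvAsum (l ++ [x]) = pvAsum l +
      PySem.List.pyGetD (PySem.List.sorted (l ++ [x]) (fun v => v) false)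
        (PySem.Int.floordiv ((l.length : Nat) : Int) 2) 0 := by
  unfold pvAsum
  have hlen : (((l ++ [x]).length : Nat) : Int) = ((l.length : Nat) : Int) + 1 := by simp
  rw [hlen, PySem.List.pyRange_one_succ_right (by omega), List.foldl_append,
      List.foldl_cons, List.foldl_nil]
  rw [PySem.List.foldl_congr_mem _ (pvBodyA (l ++ [x])) (pvBodyA l) 0 (by
    intro acc i hi
    rcases PySem.List.mem_pyRange_one.1 hi with ⟨h0, hn⟩
    exact bodyA_agree l x acc i h0 hn)]
  exact bodyA_last l x _

lemma foldB_main (l : List Int) :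
    l.foldl pvStep ([], 0) = (PySem.List.sorted l (fun v => v) false, pvAsum l) := by
  induction l using List.reverseRecOn with
  | nil =>
    have h1 : pvAsum [] = 0 := by
      unfold pvAsum
      simp [PySem.List.pyRange_one_eq_nil]
    have h2 : PySem.List.sorted ([] : List Int) (fun v => v) false = [] := by
      rw [PySem.List.sorted_eq_nil_iff]
    simp [h1, h2]
  | append_singleton l x ih =>
    rw [List.foldl_append, ih, List.foldl_cons, List.foldl_nil]
    simp only [pvStep]
    rw [insert_eq_insAux, insAux_sorted_snoc]
    refine Prod.ext rfl ?_
    simp only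
    rw [pvAsum_snoc]
    congr 1
    have hL : (((PySem.List.sorted (l ++ [x]) (fun v => v) false).length : Nat) : Int) =
        ((l.length : Nat) : Int) + 1 := by
      rw [PySem.List.length_sorted]
      simp
    rw [hL]
    norm_num

-- ===== VERDICT (by name: the statement is the Claim_ definition above) =====
theorem brute_force_median_spec : Claim_equal_brute_force_median := by
  intro array1 _ _
  unfold Spec_brute_force_median
  rw [brute_force_median_eq_asum]
  unfold brute_force_median_alt
  rw [foldB_main]
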